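-- pv_equiv track=rewrite | github.com/zwyhahaha/FormalTextbooks | scripts/generate_bubeck_docs.py | find_tracker_row
-- ===== SOURCE A (Python) =====
-- def find_tracker_row(
--     rows: list[dict[str, str]], theorem_id: str, section_id: str
-- ) -> dict[str, str]:
--     """Find the index row for a result, preferring exact section matches."""
--     exact_match = next(
--         (
--             row
--             for row in rows
--             if row.get("theorem_id") == theorem_id and row.get("section_id") == section_id
--         ),
--         None,
--     )
--     if exact_match is not None:
--         return exact_match
--
--     return next((row for row in rows if row.get("theorem_id") == theorem_id), {})
-- ===== SOURCE B (Python) =====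
-- def find_tracker_row(
--     rows: list[dict[str, str]], theorem_id: str, section_id: str
-- ) -> dict[str, str]:
--     """Find the index row for a result, preferring exact section matches."""
--     fallback = None
--     for row in rows:
--         if row.get("theorem_id") == theorem_id:
--             if row.get("section_id") == section_id:
--                 return row
--             if fallback is None:
--                 fallback = row
--     return fallback if fallback is not None else {}
-- ===== Notes on version B (the rewrite author's own statement) =====
-- stated objective: simpler
-- what changed: Replaces A's two separate generator scans (exact match, then theorem-id-only match) with one loop over rows that returns an exact match immediately and carries the first theorem-id-only match as a fallback.
import Mathlib
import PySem

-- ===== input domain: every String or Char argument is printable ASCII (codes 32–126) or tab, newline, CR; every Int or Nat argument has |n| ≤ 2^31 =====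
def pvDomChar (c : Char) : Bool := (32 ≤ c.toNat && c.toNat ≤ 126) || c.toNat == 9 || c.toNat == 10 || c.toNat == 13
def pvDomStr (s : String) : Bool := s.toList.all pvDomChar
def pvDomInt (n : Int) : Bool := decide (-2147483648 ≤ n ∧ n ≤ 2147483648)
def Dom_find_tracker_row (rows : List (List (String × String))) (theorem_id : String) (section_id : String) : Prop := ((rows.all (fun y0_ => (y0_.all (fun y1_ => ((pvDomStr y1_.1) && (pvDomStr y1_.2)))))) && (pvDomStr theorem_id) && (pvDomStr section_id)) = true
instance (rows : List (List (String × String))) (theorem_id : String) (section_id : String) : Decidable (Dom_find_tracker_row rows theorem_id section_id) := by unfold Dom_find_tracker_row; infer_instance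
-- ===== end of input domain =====

-- B replaces A's two separate scans with one loop carrying a first theorem_id-only match as fallback (simpler, same cost).
-- ===== PORT A =====
-- row.get(k): first-match lookup in an association list (Python dict keys are unique)
def pvGet (row : List (String × String)) (k : String) : Option String :=
  (row.find? (fun p => p.1 == k)).map (·.2)

def find_tracker_row (rows : List (List (String × String))) (theorem_id : String) (section_id : String) : List (String × String) :=
  match rows.find? (fun row => pvGet row "theorem_id" == some theorem_id && pvGet row "section_id" == some section_id) with
  | some row => row
  | none =>
    match rows.find? (fun row => pvGet row "theorem_id" == some theorem_id) with
    | some row => row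
    | none => []

-- ===== PORT B =====
-- single pass: return an exact match at once, carry the first theorem_id-only match as fallback
def pvLoop (rows : List (List (String × String))) (theorem_id section_id : String) (fallback : Option (List (String × String))) : List (String × String) :=
  match rows with
  | [] => fallback.getD []
  | row :: rest =>
    if pvGet row "theorem_id" == some theorem_id then
      if pvGet row "section_id" == some section_id then row
      else if fallback.isNone then pvLoop rest theorem_id section_id (some row)
      else pvLoop rest theorem_id section_id fallback
    else pvLoop rest theorem_id section_id fallback

def find_tracker_row_alt (rows : List (List (String × String))) (theorem_id : String) (section_id : String) : List (String × String) :=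
  pvLoop rows theorem_id section_id none

-- ===== PRECONDITION & SPEC =====
def Spec_find_tracker_row (rows : List (List (String × String))) (theorem_id : String) (section_id : String) (out : List (String × String)) : Prop := out = find_tracker_row_alt rows theorem_id section_id
instance (rows : List (List (String × String))) (theorem_id : String) (section_id : String) (out : List (String × String)) : Decidable (Spec_find_tracker_row rows theorem_id section_id out) := by unfold Spec_find_tracker_row; infer_instance

-- ===== CLAIM (what is proved, stated in full; the proofs are below) =====
def Claim_equal_find_tracker_row : Prop := ∀ (rows : List (List (String × String))) (theorem_id : String) (section_id : String), Dom_find_tracker_row rows theorem_id section_id → Spec_find_tracker_row rows theorem_id section_id (find_tracker_row rows theorem_id section_id)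

-- ===== LEMMAS AND PROOFS =====
theorem pvLoop_eq (theorem_id section_id : String) (rows : List (List (String × String))) :
    ∀ (fb : Option (List (String × String))),
    pvLoop rows theorem_id section_id fb =
      match rows.find? (fun row => pvGet row "theorem_id" == some theorem_id && pvGet row "section_id" == some section_id) with
      | some r => r
      | none =>
        match fb with
        | some f => f
        | none => (rows.find? (fun row => pvGet row "theorem_id" == some theorem_id)).getD [] := by
  induction rows with
  | nil => intro fb; cases fb <;> simp [pvLoop]
  | cons row rest ih =>
    intro fb
    by_cases h1 : pvGet row "theorem_id" == some theorem_id
    · by_cases h2 : pvGet row "section_id" == some section_id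
      · simp [pvLoop, h1, h2]
      · cases fb with
        | none => simp [pvLoop, h1, h2, ih]
        | some f => simp [pvLoop, h1, h2, ih]
    · cases fb with
      | none => simp [pvLoop, h1, ih]
      | some f => simp [pvLoop, h1, ih]

-- ===== VERDICT (by name: the statement is the Claim_ definition above) =====
theorem find_tracker_row_spec : Claim_equal_find_tracker_row := by
  intro rows theorem_id section_id _
  unfold Spec_find_tracker_row find_tracker_row find_tracker_row_alt
  rw [pvLoop_eq]
  cases rows.find? (fun row => pvGet row "theorem_id" == some theorem_id && pvGet row "section_id" == some section_id) with
  | some r => rfl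
  | none =>
    cases rows.find? (fun row => pvGet row "theorem_id" == some theorem_id) with
    | some r => rfl
    | none => rfl
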